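-- pv_equiv track=rewrite | github.com/DytallixHQ/Dytallix | dytallix-modules/pulseguard/src/detector/graph/dag_builder.py | find_multi_hop_paths
-- ===== SOURCE A (Python) =====
-- from typing import Dict, List, Tuple, Set
--
-- def find_multi_hop_paths(dag: Dict, min_hops: int = 3, max_paths: int = 10) -> List[List[str]]:
--     """Find multi-hop paths with length >= min_hops. Returns up to max_paths paths."""
--     edges = dag.get("edges", [])
--     adj: Dict[str, List[str]] = {}
--     for u, v, _ in edges:
--         adj.setdefault(u, []).append(v)
--
--     paths: List[List[str]] = []
--     def dfs(node: str, visited: Set[str], path: List[str]):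
--         if len(paths) >= max_paths:
--             return
--         for nxt in adj.get(node, []):
--             if nxt in visited:
--                 continue
--             new_path = path + [nxt]
--             if len(new_path) - 1 >= min_hops:
--                 paths.append(new_path)
--                 if len(paths) >= max_paths:
--                     return
--             dfs(nxt, visited | {nxt}, new_path)
--
--     for start in list(adj.keys())[:50]:  # limit breadth
--         dfs(start, {start}, [start])
--         if len(paths) >= max_paths:
--             break
--     return paths
-- ===== SOURCE B (Python) =====
-- def find_multi_hop_paths(dag, min_hops=3, max_paths=10):
--     """Iterative DFS with an explicit frame stack (visited, path, pending neighbors)."""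
--     adj = {}
--     for u, v, _ in dag.get("edges", []):
--         adj.setdefault(u, []).append(v)
--
--     paths = []
--     for start in list(adj.keys())[:50]:
--         if len(paths) >= max_paths:
--             break
--         stack = [({start}, [start], adj.get(start, []))]
--         while stack:
--             visited, path, pend = stack.pop()
--             if not pend:
--                 continue
--             nxt, rest = pend[0], pend[1:]
--             if nxt in visited:
--                 stack.append((visited, path, rest))
--                 continue
--             new_path = path + [nxt]
--             if len(new_path) - 1 >= min_hops:
--                 paths.append(new_path)
--                 if len(paths) >= max_paths:
--                     continue  # this frame is done; outer frames still run
--             stack.append((visited, path, rest))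
--             if len(paths) < max_paths:
--                 stack.append((visited | {nxt}, new_path, adj.get(nxt, [])))
--     return paths
-- ===== Notes on version B (the rewrite author's own statement) =====
-- stated objective: alternative
-- what changed: The recursive closure-mutating DFS (nested dfs with early returns mutating an enclosing paths list) is replaced by a single iterative loop over an explicit frame stack of (visited, path, pending-neighbors) triples, reproducing the same pre-order enumeration, per-path visited sets and cap behaviour.
import Mathlib
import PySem

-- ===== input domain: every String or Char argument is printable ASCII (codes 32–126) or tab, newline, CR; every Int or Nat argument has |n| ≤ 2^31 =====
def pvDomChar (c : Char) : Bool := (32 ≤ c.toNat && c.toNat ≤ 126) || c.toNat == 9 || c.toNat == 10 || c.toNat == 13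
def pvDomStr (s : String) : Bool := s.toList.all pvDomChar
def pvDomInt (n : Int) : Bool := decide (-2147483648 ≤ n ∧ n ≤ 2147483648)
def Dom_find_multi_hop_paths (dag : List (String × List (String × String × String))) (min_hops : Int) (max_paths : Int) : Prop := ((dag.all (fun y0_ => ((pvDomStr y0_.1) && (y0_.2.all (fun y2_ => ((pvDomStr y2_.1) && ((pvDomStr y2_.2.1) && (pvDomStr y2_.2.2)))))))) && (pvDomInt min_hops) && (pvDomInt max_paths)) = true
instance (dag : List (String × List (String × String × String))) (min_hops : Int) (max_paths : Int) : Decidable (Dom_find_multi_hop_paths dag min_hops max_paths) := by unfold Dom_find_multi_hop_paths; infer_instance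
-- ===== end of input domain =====

-- B rewrites A's recursive closure-mutating DFS as an iterative loop over an explicit
-- frame stack (visited, path, pending neighbors); same enumeration, different decomposition.

-- ===== PORT A =====
-- adj building: `for u, v, _ in edges: adj.setdefault(u, []).append(v)` (identical line in Source A and Source B)
def pvBuildAdj (edges : List (String × String × String)) : PySem.Dict String (List String) :=
  edges.foldl (fun adj e => PySem.Dict.modify adj e.1 [] (fun l => l ++ [e.2.1])) PySem.Dict.empty

mutual
/-- A's `dfs`. `fuel` is only a recursion-depth guard (depth ≤ edges.length + 1 < initial fuel). -/
def pvDfsA (adj : PySem.Dict String (List String)) (min_hops max_paths : Int) :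
    Nat → String → PySem.Set String → List String → List (List String) → List (List String)
  | 0, _, _, _, paths => paths
  | fuel + 1, node, visited, path, paths =>
    if (paths.length : Int) ≥ max_paths then paths
    else pvLoopA adj min_hops max_paths fuel visited path (PySem.Dict.getD adj node []) paths
termination_by fuel _ _ _ _ => (fuel, 0)
decreasing_by exact Prod.Lex.left _ _ (Nat.lt_succ_self _)

/-- A's `for nxt in adj.get(node, [])` loop with its early returns. -/
def pvLoopA (adj : PySem.Dict String (List String)) (min_hops max_paths : Int) :
    Nat → PySem.Set String → List String → List String → List (List String) → List (List String)
  | _, _, _, [], paths => paths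
  | fuel, visited, path, nxt :: rest, paths =>
    if PySem.Set.contains visited nxt then
      pvLoopA adj min_hops max_paths fuel visited path rest paths
    else
      let new_path := path ++ [nxt]
      if (new_path.length : Int) - 1 ≥ min_hops then
        let paths' := paths ++ [new_path]
        if (paths'.length : Int) ≥ max_paths then paths'
        else
          pvLoopA adj min_hops max_paths fuel visited path rest
            (pvDfsA adj min_hops max_paths fuel nxt
              (PySem.Set.union visited (PySem.Set.ofList [nxt])) new_path paths')
      else
        pvLoopA adj min_hops max_paths fuel visited path rest
          (pvDfsA adj min_hops max_paths fuel nxt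
            (PySem.Set.union visited (PySem.Set.ofList [nxt])) new_path paths)
termination_by fuel _ _ l _ => (fuel, l.length + 1)
decreasing_by
  · exact Prod.Lex.right _ (Nat.lt_succ_self _)
  · exact Prod.Lex.right _ (Nat.succ_pos _)
  · exact Prod.Lex.right _ (Nat.lt_succ_self _)
  · exact Prod.Lex.right _ (Nat.succ_pos _)
  · exact Prod.Lex.right _ (Nat.lt_succ_self _)
end


/-- A's outer `for start in list(adj.keys())[:50]` with its break. -/
def pvOuterA (adj : PySem.Dict String (List String)) (min_hops max_paths : Int) (fuel : Nat) :
    List String → List (List String) → List (List String)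
  | [], paths => paths
  | s :: rest, paths =>
    let paths' := pvDfsA adj min_hops max_paths fuel s (PySem.Set.ofList [s]) [s] paths
    if (paths'.length : Int) ≥ max_paths then paths'
    else pvOuterA adj min_hops max_paths fuel rest paths'

def find_multi_hop_paths (dag : List (String × List (String × String × String))) (min_hops : Int) (max_paths : Int) : List (List String) :=
  let edges := PySem.Dict.getD (PySem.Dict.mk dag) "edges" []
  let adj := pvBuildAdj edges
  -- `list(adj.keys())[:50]` with the nonnegative literal stop = take 50
  pvOuterA adj min_hops max_paths (edges.length + 2) ((PySem.Dict.keys adj).take 50) []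

-- ===== PORT B =====
-- termination bookkeeping for the stack machine (potential of a frame, of a stack)
def pvM (adj : PySem.Dict String (List String)) : Nat :=
  ((PySem.Dict.values adj).map List.length).foldr Nat.max 0 + 2

def pvPot (M : Nat) (f : Nat × PySem.Set String × List String × List String) : Nat :=
  M ^ f.1 * (f.2.2.2.length + 1)

def pvMeasure (adj : PySem.Dict String (List String))
    (stk : List (Nat × PySem.Set String × List String × List String)) : Nat :=
  (stk.map (pvPot (pvM adj))).sum

/-- Source B: push the continuation frame, then the child frame if `len(paths) < max_paths`.
    The gas `g` on frames is only a recursion-depth guard (as in port A's fuel). -/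
def pvPushFrames (adj : PySem.Dict String (List String)) (g : Nat) (visited : PySem.Set String)
    (path : List String) (rest : List String) (nxt : String) (new_path : List String)
    (paths : List (List String)) (max_paths : Int)
    (stk : List (Nat × PySem.Set String × List String × List String)) :
    List (Nat × PySem.Set String × List String × List String) :=
  let stk' := (g, visited, path, rest) :: stk
  if (paths.length : Int) < max_paths then
    match g with
    | 0 => stk'
    | g' + 1 =>
      (g', PySem.Set.union visited (PySem.Set.ofList [nxt]), new_path,
        PySem.Dict.getD adj nxt []) :: stk'
  else stk'

lemma pvLe_foldr_max (l : List Nat) (a : Nat) (h : a ∈ l) : a ≤ l.foldr Nat.max 0 := by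
  induction l with
  | nil => cases h
  | cons b t ih =>
    rcases List.mem_cons.mp h with rfl | h'
    · exact Nat.le_max_left _ _
    · exact le_trans (ih h') (Nat.le_max_right _ _)

lemma pvM_pos (adj : PySem.Dict String (List String)) : 0 < pvM adj := Nat.succ_pos _

lemma pvPow_pos (adj : PySem.Dict String (List String)) (g : Nat) : 0 < pvM adj ^ g :=
  Nat.pow_pos (pvM_pos adj)

lemma pvAdjLen_lt (adj : PySem.Dict String (List String)) (k : String) :
    (PySem.Dict.getD adj k []).length + 1 < pvM adj := by
  unfold pvM
  rcases h : PySem.Dict.get? adj k with _ | v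
  · rw [PySem.Dict.getD_of_get?_eq_none adj [] h]
    exact Nat.succ_lt_succ (Nat.succ_pos _)
  · rw [PySem.Dict.getD_of_get?_eq_some adj [] h]
    have hv : v ∈ PySem.Dict.values adj := by
      have := PySem.Dict.mem_items_of_get?_eq_some adj h
      exact List.mem_map.mpr ⟨(k, v), this, rfl⟩
    have hle : v.length ≤ ((PySem.Dict.values adj).map List.length).foldr Nat.max 0 :=
      pvLe_foldr_max _ _ (List.mem_map.mpr ⟨v, hv, rfl⟩)
    exact Nat.succ_lt_succ (Nat.lt_succ_of_le hle)

lemma pvTail_lt (adj : PySem.Dict String (List String))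
    (f : Nat × PySem.Set String × List String × List String)
    (stk : List (Nat × PySem.Set String × List String × List String)) :
    pvMeasure adj stk < pvMeasure adj (f :: stk) :=
  Nat.lt_add_of_pos_left (Nat.mul_pos (pvPow_pos adj f.1) (Nat.succ_pos _))

lemma pvRest_lt (adj : PySem.Dict String (List String)) (g : Nat) (v : PySem.Set String)
    (p rest : List String) (nxt : String)
    (stk : List (Nat × PySem.Set String × List String × List String)) :
    pvMeasure adj ((g, v, p, rest) :: stk) < pvMeasure adj ((g, v, p, nxt :: rest) :: stk) :=
  Nat.add_lt_add_right
    ((Nat.mul_lt_mul_left (pvPow_pos adj g)).mpr (Nat.lt_succ_self _)) _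

lemma pvPush_lt (adj : PySem.Dict String (List String)) (g : Nat) (visited : PySem.Set String)
    (path rest : List String) (nxt : String) (new_path : List String)
    (paths : List (List String)) (max_paths : Int)
    (stk : List (Nat × PySem.Set String × List String × List String)) :
    pvMeasure adj (pvPushFrames adj g visited path rest nxt new_path paths max_paths stk)
      < pvMeasure adj ((g, visited, path, nxt :: rest) :: stk) := by
  unfold pvPushFrames
  split
  · cases g with
    | zero => exact pvRest_lt adj 0 visited path rest nxt stk
    | succ g' =>
      show pvM adj ^ g' * ((PySem.Dict.getD adj nxt []).length + 1)
            + (pvM adj ^ (g' + 1) * (rest.length + 1) + pvMeasure adj stk)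
          < pvM adj ^ (g' + 1) * ((nxt :: rest).length + 1) + pvMeasure adj stk
      have h1 : pvM adj ^ g' * ((PySem.Dict.getD adj nxt []).length + 1) < pvM adj ^ (g' + 1) := by
        rw [pow_succ]
        exact (Nat.mul_lt_mul_left (pvPow_pos adj g')).mpr (pvAdjLen_lt adj nxt)
      have key : pvM adj ^ g' * ((PySem.Dict.getD adj nxt []).length + 1)
            + pvM adj ^ (g' + 1) * (rest.length + 1)
          < pvM adj ^ (g' + 1) * ((nxt :: rest).length + 1) := by
        rw [List.length_cons, Nat.mul_succ (pvM adj ^ (g' + 1)) (rest.length + 1),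
            Nat.add_comm (pvM adj ^ (g' + 1) * (rest.length + 1)) (pvM adj ^ (g' + 1))]
        exact Nat.add_lt_add_right h1 _
      rw [← Nat.add_assoc]
      exact Nat.add_lt_add_right key _
  · exact pvRest_lt adj g visited path rest nxt stk

/-- Source B's `while stack:` loop. -/
def pvStepB (adj : PySem.Dict String (List String)) (min_hops max_paths : Int) :
    List (Nat × PySem.Set String × List String × List String) → List (List String) → List (List String)
  | [], paths => paths
  | (_, _, _, []) :: stk, paths => pvStepB adj min_hops max_paths stk paths
  | (g, visited, path, nxt :: rest) :: stk, paths =>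
    if PySem.Set.contains visited nxt then
      pvStepB adj min_hops max_paths ((g, visited, path, rest) :: stk) paths
    else
      let new_path := path ++ [nxt]
      if (new_path.length : Int) - 1 ≥ min_hops then
        let paths' := paths ++ [new_path]
        if (paths'.length : Int) ≥ max_paths then
          pvStepB adj min_hops max_paths stk paths'
        else
          pvStepB adj min_hops max_paths
            (pvPushFrames adj g visited path rest nxt new_path paths' max_paths stk) paths'
      else
        pvStepB adj min_hops max_paths
          (pvPushFrames adj g visited path rest nxt new_path paths max_paths stk) paths
termination_by stk _ => pvMeasure adj stk
decreasing_by
  · exact pvTail_lt ..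
  · exact pvRest_lt ..
  · exact pvTail_lt ..
  · exact pvPush_lt ..
  · exact pvPush_lt ..

/-- Source B's outer `for start in ...` with its pre-check break. -/
def pvOuterB (adj : PySem.Dict String (List String)) (min_hops max_paths : Int) (gas : Nat) :
    List String → List (List String) → List (List String)
  | [], paths => paths
  | s :: rest, paths =>
    if (paths.length : Int) ≥ max_paths then paths
    else
      pvOuterB adj min_hops max_paths gas rest
        (pvStepB adj min_hops max_paths
          [(gas, PySem.Set.ofList [s], [s], PySem.Dict.getD adj s [])] paths)

def find_multi_hop_paths_alt (dag : List (String × List (String × String × String))) (min_hops : Int) (max_paths : Int) : List (List String) :=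
  let edges := PySem.Dict.getD (PySem.Dict.mk dag) "edges" []
  let adj := pvBuildAdj edges
  pvOuterB adj min_hops max_paths (edges.length + 1) ((PySem.Dict.keys adj).take 50) []

-- ===== PRECONDITION & SPEC =====
def Spec_find_multi_hop_paths (dag : List (String × List (String × String × String))) (min_hops : Int) (max_paths : Int) (out : List (List String)) : Prop := out = find_multi_hop_paths_alt dag min_hops max_paths
instance (dag : List (String × List (String × String × String))) (min_hops : Int) (max_paths : Int) (out : List (List String)) : Decidable (Spec_find_multi_hop_paths dag min_hops max_paths out) := by unfold Spec_find_multi_hop_paths; infer_instance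

-- ===== CLAIM (what is proved, stated in full; the proofs are below) =====
def Claim_equal_find_multi_hop_paths : Prop := ∀ (dag : List (String × List (String × String × String))) (min_hops : Int) (max_paths : Int), Dom_find_multi_hop_paths dag min_hops max_paths → Spec_find_multi_hop_paths dag min_hops max_paths (find_multi_hop_paths dag min_hops max_paths)

-- ===== LEMMAS AND PROOFS =====

/-- Core simulation: processing one frame with gas `g` on top of `stk` equals running A's
    neighbor loop at fuel `g` and continuing with `stk`. -/
lemma pvSim (adj : PySem.Dict String (List String)) (min_hops max_paths : Int) :
    ∀ (g : Nat) (pend : List String) (v : PySem.Set String) (p : List String)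
      (stk : List (Nat × PySem.Set String × List String × List String)) (paths : List (List String)),
      pvStepB adj min_hops max_paths ((g, v, p, pend) :: stk) paths
        = pvStepB adj min_hops max_paths stk (pvLoopA adj min_hops max_paths g v p pend paths) := by
  intro g
  induction g using Nat.strong_induction_on with
  | _ g IHg =>
    intro pend
    induction pend with
    | nil => intro v p stk paths; simp [pvStepB, pvLoopA]
    | cons nxt rest IHp =>
      intro v p stk paths
      simp only [pvStepB, pvLoopA]
      by_cases hvis : PySem.Set.contains v nxt = true
      · simp only [hvis, if_true]
        exact IHp v p stk paths
      · simp only [hvis, if_false, Bool.false_eq_true]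
        by_cases hq : ((p ++ [nxt]).length : Int) - 1 ≥ min_hops
        · simp only [hq, if_true]
          by_cases hcap : ((paths ++ [p ++ [nxt]]).length : Int) ≥ max_paths
          · simp only [hcap, if_true]
          · simp only [hcap, if_false]
            have hlt : ((paths ++ [p ++ [nxt]]).length : Int) < max_paths := by omega
            cases g with
            | zero =>
              simp only [pvPushFrames, hlt, if_true]
              rw [IHp]
              simp [pvDfsA]
            | succ g' =>
              simp only [pvPushFrames, hlt, if_true]
              rw [IHg g' (Nat.lt_succ_self g'), IHp]
              simp only [pvDfsA, hcap, if_false]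
        · simp only [hq, if_false]
          by_cases hcap : ((paths).length : Int) ≥ max_paths
          · have hnlt : ¬ ((paths.length : Int) < max_paths) := by omega
            cases g with
            | zero =>
              simp only [pvPushFrames, hnlt, if_false]
              rw [IHp]
              simp [pvDfsA]
            | succ g' =>
              simp only [pvPushFrames, hnlt, if_false]
              rw [IHp]
              simp only [pvDfsA, hcap, if_true]
          · have hlt : ((paths.length : Int) < max_paths) := by omega
            cases g with
            | zero =>
              simp only [pvPushFrames, hlt, if_true]
              rw [IHp]
              simp [pvDfsA]
            | succ g' =>
              simp only [pvPushFrames, hlt, if_true]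
              rw [IHg g' (Nat.lt_succ_self g'), IHp]
              simp only [pvDfsA, hcap, if_false]

lemma pvOuterB_cap (adj : PySem.Dict String (List String)) (min_hops max_paths : Int) (gas : Nat)
    (starts : List String) (paths : List (List String)) (h : (paths.length : Int) ≥ max_paths) :
    pvOuterB adj min_hops max_paths gas starts paths = paths := by
  cases starts <;> simp [pvOuterB, h]

lemma pvOuter_eq (adj : PySem.Dict String (List String)) (min_hops max_paths : Int) (F : Nat) :
    ∀ (starts : List String) (paths : List (List String)),
      pvOuterA adj min_hops max_paths (F + 1) starts paths
        = pvOuterB adj min_hops max_paths F starts paths := by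
  intro starts
  induction starts with
  | nil => intro paths; simp [pvOuterA, pvOuterB]
  | cons s rest IH =>
    intro paths
    simp only [pvOuterA, pvOuterB]
    by_cases hcap : (paths.length : Int) ≥ max_paths
    · simp [pvDfsA, hcap]
    · simp only [hcap, if_false]
      have hstep : pvStepB adj min_hops max_paths
            [(F, PySem.Set.ofList [s], [s], PySem.Dict.getD adj s [])] paths
          = pvLoopA adj min_hops max_paths F (PySem.Set.ofList [s]) [s]
              (PySem.Dict.getD adj s []) paths := by
        rw [pvSim]; simp [pvStepB]
      rw [hstep]
      have hdfs : pvDfsA adj min_hops max_paths (F + 1) s (PySem.Set.ofList [s]) [s] paths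
          = pvLoopA adj min_hops max_paths F (PySem.Set.ofList [s]) [s]
              (PySem.Dict.getD adj s []) paths := by
        simp only [pvDfsA, hcap, if_false]
      rw [hdfs]
      by_cases hcap' : ((pvLoopA adj min_hops max_paths F (PySem.Set.ofList [s]) [s]
          (PySem.Dict.getD adj s []) paths).length : Int) ≥ max_paths
      · rw [if_pos hcap', pvOuterB_cap adj min_hops max_paths F rest _ hcap']
      · rw [if_neg hcap', IH]

-- ===== VERDICT (by name: the statement is the Claim_ definition above) =====
theorem find_multi_hop_paths_spec : Claim_equal_find_multi_hop_paths := by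
  unfold Claim_equal_find_multi_hop_paths
  intro dag min_hops max_paths _
  unfold Spec_find_multi_hop_paths find_multi_hop_paths find_multi_hop_paths_alt
  have h : (PySem.Dict.getD (PySem.Dict.mk dag) "edges" []).length + 2
      = ((PySem.Dict.getD (PySem.Dict.mk dag) "edges" []).length + 1) + 1 := by omega
  simp only [h]
  exact pvOuter_eq ..
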